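-- pv_equiv track=rewrite | github.com/SIXTH-SENSE-ENTERPRISE/optqo-platform-ide | script.py | simple_response_cleaner
-- ===== SOURCE A (Python) =====
-- def simple_response_cleaner(response_content):
--     """
--     Minimal cleaner - just handle multiple steps and tabs
--     """
--     # Replace tabs with spaces
--     response_content = response_content.replace('\t', '    ')
--
--     # If multiple steps, keep only the first
--     if response_content.count('step:') > 1:
--         lines = response_content.split('\n')
--         cleaned_lines = []
--         step_found = False
--
--         for line in lines:
--             if line.strip().startswith('step:') and step_found:
--                 break
--             cleaned_lines.append(line)
--             if line.strip().startswith('step:'):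
--                 step_found = True
--
--         return '\n'.join(cleaned_lines).strip()
--
--     return response_content.strip()
-- ===== SOURCE B (Python) =====
-- def simple_response_cleaner(response_content):
--     """
--     Minimal cleaner - just handle multiple steps and tabs
--     """
--     response_content = response_content.replace('\t', '    ')
--
--     if response_content.count('step:') > 1:
--         lines = response_content.split('\n')
--         # Partition the lines into segments: a preamble segment, then one
--         # segment per step-line (each segment starts at a step-line).
--         segments = [[]]
--         for line in lines:
--             if line.strip().startswith('step:'):
--                 segments.append([])
--             segments[-1].append(line)
--         # Keep the preamble and the first step segment only (i.e. drop
--         # everything from the second step-line on); if there are fewer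
--         # than two step segments, keep everything.
--         if len(segments) > 2:
--             kept = segments[0] + segments[1]
--         else:
--             kept = lines
--         return '\n'.join(kept).strip()
--
--     return response_content.strip()
-- ===== Notes on version B (the rewrite author's own statement) =====
-- stated objective: alternative
-- what changed: Replaces A's flag-and-break truncating scan by a full partition of the lines into step-delimited segments followed by selecting the preamble and first step segment.
import Mathlib
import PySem

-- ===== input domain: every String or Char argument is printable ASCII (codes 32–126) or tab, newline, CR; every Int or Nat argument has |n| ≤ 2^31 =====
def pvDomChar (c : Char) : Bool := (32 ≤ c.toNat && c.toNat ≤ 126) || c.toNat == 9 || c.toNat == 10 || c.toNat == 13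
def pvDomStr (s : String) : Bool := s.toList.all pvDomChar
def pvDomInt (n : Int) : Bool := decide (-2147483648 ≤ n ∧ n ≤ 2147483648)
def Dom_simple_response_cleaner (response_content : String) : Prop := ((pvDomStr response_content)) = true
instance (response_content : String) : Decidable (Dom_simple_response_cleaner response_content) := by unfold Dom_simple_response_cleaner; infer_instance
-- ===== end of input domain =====

-- B partitions the lines into step-delimited segments and keeps the first two, instead of A's flag-and-break truncating scan (objective: alternative).

-- ===== PORT A =====
-- s.split('\n') — exact: PySem.Chars.splitOn on code points
def pvSplitNL (s : String) : List String :=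
  (PySem.Chars.splitOn s.toList "\n".toList).map String.ofList

-- line.strip().startswith('step:')
def pvIsStep (l : String) : Bool := PySem.Str.startswith (PySem.Str.strip l) "step:"

-- A's for-loop with step_found flag and break, accumulator kept reversed
def pvLoopA : List String → Bool → List String → List String
  | [], _, acc => acc.reverse
  | l :: ls, step_found, acc =>
    if pvIsStep l && step_found then acc.reverse
    else
      let acc := l :: acc
      if pvIsStep l then pvLoopA ls true acc
      else pvLoopA ls step_found acc

def simple_response_cleaner (response_content : String) : String :=
  let rc := PySem.Str.replace response_content "\t" "    "
  if PySem.Str.count rc "step:" > 1 then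
    let lines := pvSplitNL rc
    PySem.Str.strip (PySem.Str.join "\n" (pvLoopA lines false []))
  else
    PySem.Str.strip rc

-- ===== PORT B =====
-- segments[-1].append(line): append to the last segment of a non-empty segment list
def pvAppendLast : List (List String) → String → List (List String)
  | [], l => [[l]]
  | [s], l => [s ++ [l]]
  | s :: rest, l => s :: pvAppendLast rest l

-- one iteration of B's partitioning loop
def pvSegStep (segs : List (List String)) (l : String) : List (List String) :=
  pvAppendLast (if pvIsStep l then segs ++ [[]] else segs) l

def simple_response_cleaner_alt (response_content : String) : String :=
  let rc := PySem.Str.replace response_content "\t" "    "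
  if PySem.Str.count rc "step:" > 1 then
    let lines := pvSplitNL rc
    let segments := lines.foldl pvSegStep [[]]
    let kept := if segments.length > 2 then segments.getD 0 [] ++ segments.getD 1 [] else lines
    PySem.Str.strip (PySem.Str.join "\n" kept)
  else
    PySem.Str.strip rc

-- ===== PRECONDITION & SPEC =====
def Spec_simple_response_cleaner (response_content : String) (out : String) : Prop := out = simple_response_cleaner_alt response_content
instance (response_content : String) (out : String) : Decidable (Spec_simple_response_cleaner response_content out) := by unfold Spec_simple_response_cleaner; infer_instance

-- ===== CLAIM (what is proved, stated in full; the proofs are below) =====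
def Claim_equal_simple_response_cleaner : Prop := ∀ (response_content : String), Dom_simple_response_cleaner response_content → Spec_simple_response_cleaner response_content (simple_response_cleaner response_content)

-- ===== LEMMAS AND PROOFS =====

-- "not a step line" predicate
def pvNS (l : String) : Bool := !pvIsStep l

theorem pvLoopA_true (ls : List String) (acc : List String) :
    pvLoopA ls true acc = acc.reverse ++ ls.takeWhile pvNS := by
  induction ls generalizing acc with
  | nil => simp [pvLoopA]
  | cons l ls ih =>
    by_cases hp : pvIsStep l
    · simp [pvLoopA, hp, List.takeWhile, pvNS]
    · simp [pvLoopA, hp, List.takeWhile, pvNS, ih]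

-- A's loop computes: all lines up to and including the first step-line, then
-- the following lines up to (excluding) the next step-line.
theorem pvLoopA_false (ls : List String) (acc : List String) :
    pvLoopA ls false acc =
      acc.reverse ++ ls.takeWhile pvNS ++
        (match ls.dropWhile pvNS with
         | [] => []
         | s :: rest => s :: rest.takeWhile pvNS) := by
  induction ls generalizing acc with
  | nil => simp [pvLoopA]
  | cons l ls ih =>
    by_cases hp : pvIsStep l
    · simp [pvLoopA, hp, pvLoopA_true, List.takeWhile, List.dropWhile, pvNS]
    · simp only [pvLoopA, hp, Bool.false_and, if_false, Bool.false_eq_true]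
      rw [ih (l :: acc)]
      simp [List.takeWhile, List.dropWhile, pvNS, hp]

theorem pvLoopA_spec (ls : List String) :
    pvLoopA ls false [] =
      ls.takeWhile pvNS ++
        (match ls.dropWhile pvNS with
         | [] => []
         | s :: rest => s :: rest.takeWhile pvNS) := by
  simpa using pvLoopA_false ls []

-- pvAppendLast only touches the final segment
theorem pvAppendLast_append (xs : List (List String)) (c : List String) (l : String) :
    pvAppendLast (xs ++ [c]) l = xs ++ [c ++ [l]] := by
  induction xs with
  | nil => rfl
  | cons x xs ih =>
    cases xs with
    | nil => rfl
    | cons y ys => simpa [pvAppendLast] using ih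

theorem pvAppendLast_ne_nil (segs : List (List String)) (l : String) :
    pvAppendLast segs l ≠ [] := by
  cases segs with
  | nil => simp [pvAppendLast]
  | cons s rest => cases rest <;> simp [pvAppendLast]

theorem pvSegStep_factor (segs ss : List (List String)) (hss : ss ≠ []) (l : String) :
    pvSegStep (segs ++ ss) l = segs ++ pvSegStep ss l := by
  obtain ⟨ss', c, rfl⟩ : ∃ ss' c, ss = ss' ++ [c] := by
    rcases List.eq_nil_or_concat ss with h | ⟨ss', c, h⟩
    · exact absurd h hss
    · exact ⟨ss', c, by simpa [List.concat_eq_append] using h⟩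
  unfold pvSegStep
  by_cases hp : pvIsStep l <;>
    simp [hp, pvAppendLast_append, ← List.append_assoc]

theorem pvFold_ne_nil (lines : List String) (ss : List (List String)) (hss : ss ≠ []) :
    lines.foldl pvSegStep ss ≠ [] := by
  induction lines generalizing ss with
  | nil => exact hss
  | cons l ls ih =>
    simp only [List.foldl_cons]
    exact ih _ (pvAppendLast_ne_nil _ _)

theorem pvFold_factor (lines : List String) (segs ss : List (List String)) (hss : ss ≠ []) :
    lines.foldl pvSegStep (segs ++ ss) = segs ++ lines.foldl pvSegStep ss := by
  induction lines generalizing ss with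
  | nil => rfl
  | cons l ls ih =>
    simp only [List.foldl_cons, pvSegStep_factor segs ss hss l]
    exact ih _ (pvAppendLast_ne_nil _ _)

-- structure of B's partitioning fold started from one open segment
theorem pvSegRun (lines : List String) (cur : List String) :
    lines.foldl pvSegStep [cur] =
      (match lines.dropWhile pvNS with
       | [] => [cur ++ lines]
       | s :: rest => (cur ++ lines.takeWhile pvNS) :: rest.foldl pvSegStep [[s]]) := by
  induction lines generalizing cur with
  | nil => simp
  | cons l ls ih =>
    by_cases hp : pvIsStep l
    · have hstep : pvSegStep [cur] l = [cur] ++ [[l]] := by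
        unfold pvSegStep; rw [if_pos hp]
        simpa using pvAppendLast_append [cur] [] l
      simp only [List.foldl_cons, hstep, pvFold_factor ls [cur] [[l]] (by simp)]
      simp [List.dropWhile, List.takeWhile, pvNS, hp]
    · have hstep : pvSegStep [cur] l = [cur ++ [l]] := by
        simp [pvSegStep, pvAppendLast, hp]
      simp only [List.foldl_cons, hstep, ih (cur ++ [l])]
      rcases h : ls.dropWhile pvNS with _ | ⟨s, rest⟩ <;>
        simp [List.dropWhile, List.takeWhile, pvNS, hp, h]

-- the two line-selection strategies agree
theorem pvLists_eq (lines : List String) :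
    pvLoopA lines false [] =
      (let segments := lines.foldl pvSegStep [[]]
       if segments.length > 2 then segments.getD 0 [] ++ segments.getD 1 [] else lines) := by
  rw [pvLoopA_spec]
  rw [show ([[]] : List (List String)) = [([] : List String)] from rfl, pvSegRun]
  rcases h1 : lines.dropWhile pvNS with _ | ⟨s, rest⟩
  · -- no step line at all: one segment
    have : lines.takeWhile pvNS = lines := by
      have := List.takeWhile_append_dropWhile (p := pvNS) (l := lines)
      rwa [h1, List.append_nil] at this
    simp [this]
  · simp only []
    rw [pvSegRun rest [s]]
    rcases h2 : rest.dropWhile pvNS with _ | ⟨s2, rest2⟩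
    · -- exactly one step line: two segments, keep everything
      have hr : rest.takeWhile pvNS = rest := by
        have := List.takeWhile_append_dropWhile (p := pvNS) (l := rest)
        rwa [h2, List.append_nil] at this
      have hl : lines.takeWhile pvNS ++ s :: rest = lines := by
        have := List.takeWhile_append_dropWhile (p := pvNS) (l := lines)
        rwa [h1] at this
      simp [hr, hl]
    · -- at least two step lines: three or more segments, keep the first two
      have h3 : rest2.foldl pvSegStep [[s2]] ≠ [] := pvFold_ne_nil _ _ (by simp)
      rcases h4 : rest2.foldl pvSegStep [[s2]] with _ | ⟨a, b⟩
      · exact absurd h4 h3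
      · simp [h4]

-- ===== VERDICT (by name: the statement is the Claim_ definition above) =====
theorem simple_response_cleaner_spec : Claim_equal_simple_response_cleaner := by
  intro rc _
  unfold Spec_simple_response_cleaner simple_response_cleaner simple_response_cleaner_alt
  simp only []
  split
  · rw [pvLists_eq]
  · rfl
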